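-- pv_equiv track=rewrite | github.com/amuesing/sifters | sifters/third/test2.py | accent_velocity
-- ===== SOURCE A (Python) =====
-- def accent_velocity(binary, accent_binaries, profile):
--     velocities = []
--     n = len(binary)
--     accent_arrays = list(accent_binaries.values())
--     accent_labels = list(accent_binaries.keys())
--
--     for i in range(n):
--         if not binary[i]:
--             velocities.append(profile['gap'])
--             continue
--
--         active_labels = [label for label, arr in zip(accent_labels, accent_arrays) if arr[i % len(arr)]]
--
--         if len(active_labels) >= 2:
--             velocities.append(profile['overlap'])
--         elif len(active_labels) == 1:
--             velocities.append(profile[active_labels[0]])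
--         else:
--             velocities.append(profile['gap'])
--
--     return velocities
-- ===== SOURCE B (Python) =====
-- def accent_velocity(binary, accent_binaries, profile):
--     n = len(binary)
--     count = [0] * n
--     label = [None] * n
--     for lab, arr in accent_binaries.items():
--         m = len(arr)
--         for i in range(n):
--             if binary[i] and arr[i % m]:
--                 count[i] += 1
--                 label[i] = lab
--     velocities = []
--     for i in range(n):
--         if not binary[i]:
--             velocities.append(profile['gap'])
--         elif count[i] >= 2:
--             velocities.append(profile['overlap'])
--         elif count[i] == 1:
--             velocities.append(profile[label[i]])
--         else:
--             velocities.append(profile['gap'])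
--     return velocities
-- ===== Notes on version B (the rewrite author's own statement) =====
-- stated objective: faster
-- what changed: Instead of rescanning every accent array at every position, B makes one pass per accent filling a per-position overlap-count table and an active-label table, then emits the velocity for each position by a single table lookup.
import Mathlib
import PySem

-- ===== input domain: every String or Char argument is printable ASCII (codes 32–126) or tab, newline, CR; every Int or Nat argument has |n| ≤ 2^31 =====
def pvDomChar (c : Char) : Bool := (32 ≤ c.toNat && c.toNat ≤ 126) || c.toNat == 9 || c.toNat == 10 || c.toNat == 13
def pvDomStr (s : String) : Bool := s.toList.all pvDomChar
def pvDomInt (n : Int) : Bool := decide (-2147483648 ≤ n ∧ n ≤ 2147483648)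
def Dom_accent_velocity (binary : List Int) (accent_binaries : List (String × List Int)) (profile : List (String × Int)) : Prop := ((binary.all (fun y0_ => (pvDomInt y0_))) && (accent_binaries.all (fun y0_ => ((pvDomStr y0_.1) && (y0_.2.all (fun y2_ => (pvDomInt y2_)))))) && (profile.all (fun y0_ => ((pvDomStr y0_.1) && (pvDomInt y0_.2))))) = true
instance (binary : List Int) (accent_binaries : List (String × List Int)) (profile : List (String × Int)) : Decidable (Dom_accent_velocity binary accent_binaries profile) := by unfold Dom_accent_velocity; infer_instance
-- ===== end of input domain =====

-- B replaces A's per-position rescan of all accent arrays by a two-phase pass that first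
-- builds a per-position overlap-count table and active-label table (outer loop over the
-- accents), then reads the tables once per position; equivalence of the RETURN value is proved.

-- ===== PORT A =====
def accent_velocity (binary : List Int) (accent_binaries : List (String × List Int)) (profile : List (String × Int)) : List Int :=
  let prof := PySem.Dict.ofList profile
  let ab := PySem.Dict.ofList accent_binaries
  let n : Int := binary.length
  let accent_arrays := ab.values
  let accent_labels := ab.keys
  (PySem.List.pyRange 0 n 1).foldl (fun velocities i =>
    if PySem.List.pyGetD binary i 0 = 0 then
      velocities ++ [prof.getD "gap" 0]
    else
      let active_labels := ((accent_labels.zip accent_arrays).filter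
        (fun p => PySem.List.pyGetD p.2 (PySem.Int.mod i (p.2.length : Int)) 0 != 0)).map (·.1)
      if 2 ≤ active_labels.length then velocities ++ [prof.getD "overlap" 0]
      else if active_labels.length = 1 then
        velocities ++ [prof.getD (PySem.List.pyGetD active_labels 0 "") 0]
      else velocities ++ [prof.getD "gap" 0]) []

-- ===== PORT B =====
-- B-side helpers: the guarded per-position condition, one table-update step, one accent's pass
def pvCond (binary : List Int) (p : String × List Int) (i : Int) : Bool :=
  PySem.List.pyGetD binary i 0 != 0 && PySem.List.pyGetD p.2 (PySem.Int.mod i (p.2.length : Int)) 0 != 0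

def pvStep (binary : List Int) (p : String × List Int) (t : List Int × List String) (i : Int) : List Int × List String :=
  if pvCond binary p i then
    (PySem.List.pySetD t.1 i (PySem.List.pyGetD t.1 i 0 + 1), PySem.List.pySetD t.2 i p.1)
  else t

def pvInner (binary : List Int) (n : Int) (t : List Int × List String) (p : String × List Int) : List Int × List String :=
  (PySem.List.pyRange 0 n 1).foldl (pvStep binary p) t

def accent_velocity_alt (binary : List Int) (accent_binaries : List (String × List Int)) (profile : List (String × Int)) : List Int :=
  let prof := PySem.Dict.ofList profile
  let ab := PySem.Dict.ofList accent_binaries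
  let n : Int := binary.length
  let tables := ab.items.foldl (pvInner binary n)
    (List.replicate binary.length (0 : Int), List.replicate binary.length "")
  (PySem.List.pyRange 0 n 1).foldl (fun velocities i =>
    if PySem.List.pyGetD binary i 0 = 0 then velocities ++ [prof.getD "gap" 0]
    else if 2 ≤ PySem.List.pyGetD tables.1 i 0 then velocities ++ [prof.getD "overlap" 0]
    else if PySem.List.pyGetD tables.1 i 0 = 1 then
      velocities ++ [prof.getD (PySem.List.pyGetD tables.2 i "") 0]
    else velocities ++ [prof.getD "gap" 0]) []

-- ===== PRECONDITION & SPEC =====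
-- Pre_ excludes exactly the inputs where Python A raises: a KeyError (a needed profile key —
-- 'gap', 'overlap', or the single active accent label — is missing at some position) or a
-- ZeroDivisionError (some accent array is empty while some binary step is truthy).
def Pre_accent_velocity (binary : List Int) (accent_binaries : List (String × List Int)) (profile : List (String × Int)) : Prop :=
  let ks := (PySem.Dict.ofList profile).keys
  let items := (PySem.Dict.ofList accent_binaries).items
  ∀ i ∈ PySem.List.pyRange 0 (binary.length : Int) 1,
    (PySem.List.pyGetD binary i 0 = 0 → "gap" ∈ ks) ∧
    (PySem.List.pyGetD binary i 0 ≠ 0 →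
      (∀ p ∈ items, p.2 ≠ []) ∧
      (let c := items.countP (fun p => PySem.List.pyGetD p.2 (PySem.Int.mod i (p.2.length : Int)) 0 != 0)
       (2 ≤ c → "overlap" ∈ ks) ∧
       (c = 1 → ∀ p ∈ items, (PySem.List.pyGetD p.2 (PySem.Int.mod i (p.2.length : Int)) 0 != 0) = true → p.1 ∈ ks) ∧
       (c = 0 → "gap" ∈ ks)))
instance (binary : List Int) (accent_binaries : List (String × List Int)) (profile : List (String × Int)) : Decidable (Pre_accent_velocity binary accent_binaries profile) := by unfold Pre_accent_velocity; infer_instance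

def pvWitness_accent_velocity : List Int × (List (String × List Int)) × (List (String × Int)) :=
  ([1, 0, 1], [("a", [1, 0]), ("b", [1])], [("gap", 10), ("a", 20), ("b", 30), ("overlap", 40)])

def Spec_accent_velocity (binary : List Int) (accent_binaries : List (String × List Int)) (profile : List (String × Int)) (out : List Int) : Prop := out = accent_velocity_alt binary accent_binaries profile
instance (binary : List Int) (accent_binaries : List (String × List Int)) (profile : List (String × Int)) (out : List Int) : Decidable (Spec_accent_velocity binary accent_binaries profile out) := by unfold Spec_accent_velocity; infer_instance

-- ===== CLAIM (what is proved, stated in full; the proofs are below) =====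
def Claim_equal_accent_velocity : Prop := ∀ (binary : List Int) (accent_binaries : List (String × List Int)) (profile : List (String × Int)), Dom_accent_velocity binary accent_binaries profile → Pre_accent_velocity binary accent_binaries profile → Spec_accent_velocity binary accent_binaries profile (accent_velocity binary accent_binaries profile)

-- ===== LEMMAS AND PROOFS =====

lemma pvGetSet {α : Type} (xs : List α) (a : Int) (ha : 0 ≤ a) (v : α) (j : Nat) (hj : j < xs.length) (d : α) :
    PySem.List.pyGetD (PySem.List.pySetD xs a v) (j : Int) d
      = if a = (j : Int) then v else PySem.List.pyGetD xs (j : Int) d := by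
  rw [PySem.List.pySetD_of_nonneg xs v ha]
  rw [PySem.List.pyGetD_eq_getElem _ d (by positivity) (by simpa using hj)]
  rw [List.getElem_set]
  rw [PySem.List.pyGetD_eq_getElem _ d (by positivity) (by simpa using hj)]
  simp only [Int.toNat_natCast]
  congr 1
  simp only [eq_iff_iff]
  omega

lemma pvFold_get (binary : List Int) (p : String × List Int) (L : List Int) (hNd : L.Nodup)
    (hL : ∀ x ∈ L, 0 ≤ x)
    (t : List Int × List String) (j : Nat) (hj1 : j < t.1.length) (hj2 : j < t.2.length) :
    PySem.List.pyGetD (L.foldl (pvStep binary p) t).1 (j : Int) 0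
      = PySem.List.pyGetD t.1 (j : Int) 0 + (if pvCond binary p j ∧ (j : Int) ∈ L then 1 else 0) ∧
    PySem.List.pyGetD (L.foldl (pvStep binary p) t).2 (j : Int) ""
      = (if pvCond binary p j ∧ (j : Int) ∈ L then p.1 else PySem.List.pyGetD t.2 (j : Int) "") := by
  induction L generalizing t with
  | nil => simp
  | cons a L ih =>
    simp only [List.foldl_cons]
    have ha : 0 ≤ a := hL a (by simp)
    have hlen1 : (pvStep binary p t a).1.length = t.1.length := by
      unfold pvStep; split <;> simp [PySem.List.length_pySetD]
    have hlen2 : (pvStep binary p t a).2.length = t.2.length := by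
      unfold pvStep; split <;> simp [PySem.List.length_pySetD]
    obtain ⟨ih1, ih2⟩ := ih (hNd.of_cons) (fun x hx => hL x (by simp [hx])) (pvStep binary p t a)
      (by omega) (by omega)
    rw [ih1, ih2]
    by_cases hja : a = (j : Int)
    · have hjL : ((j : Int)) ∉ L := by
        have := (List.nodup_cons.mp hNd).1; rw [hja] at this; simpa using this
      by_cases hc : pvCond binary p a
      · simp only [pvStep, hc, if_true]
        rw [pvGetSet t.1 a ha _ j (by omega) 0, pvGetSet t.2 a ha _ j (by omega) ""]
        simp [hja, hja ▸ hc, hjL]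
      · simp [pvStep, hc, hja ▸ hc, hjL, hja]
    · have hmem : ((j : Int) ∈ a :: L) ↔ ((j : Int) ∈ L) := by simp [List.mem_cons]; omega
      by_cases hc : pvCond binary p a
      · simp only [pvStep, hc, if_true]
        rw [pvGetSet t.1 a ha _ j (by omega) 0, pvGetSet t.2 a ha _ j (by omega) ""]
        simp [hja, hmem]
      · simp [pvStep, hc, hmem]

lemma pvStep_len (binary : List Int) (p : String × List Int) (t : List Int × List String) (i : Int) :
    (pvStep binary p t i).1.length = t.1.length ∧ (pvStep binary p t i).2.length = t.2.length := by
  unfold pvStep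
  split <;> simp [PySem.List.length_pySetD]

lemma pvFold_len (binary : List Int) (p : String × List Int) (L : List Int) (t : List Int × List String) :
    (L.foldl (pvStep binary p) t).1.length = t.1.length ∧ (L.foldl (pvStep binary p) t).2.length = t.2.length := by
  induction L generalizing t with
  | nil => simp
  | cons a L ih =>
    simp only [List.foldl_cons]
    obtain ⟨h1, h2⟩ := ih (pvStep binary p t a)
    obtain ⟨g1, g2⟩ := pvStep_len binary p t a
    omega

lemma pvGetLastD_cons {α : Type} (x : α) (xs : List α) (d : α) :
    ((x :: xs).getLast?).getD d = (xs.getLast?).getD x := by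
  cases h : xs.getLast? with
  | none => rw [List.getLast?_eq_none_iff] at h; subst h; simp
  | some z =>
    have hne : xs ≠ [] := by rintro rfl; simp at h
    simp [List.getLast?_cons, List.getLastD_eq_getLast?, h]

lemma pvOuter_get (binary : List Int) (l : List (String × List Int)) (t : List Int × List String)
    (j : Nat) (hjn : j < binary.length)
    (h1 : t.1.length = binary.length) (h2 : t.2.length = binary.length) :
    PySem.List.pyGetD (l.foldl (pvInner binary binary.length) t).1 (j : Int) 0
      = PySem.List.pyGetD t.1 (j : Int) 0 + (l.countP (fun p => pvCond binary p j) : Int) ∧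
    PySem.List.pyGetD (l.foldl (pvInner binary binary.length) t).2 (j : Int) ""
      = (((l.filter (fun p => pvCond binary p j)).map (·.1)).getLast?).getD (PySem.List.pyGetD t.2 (j : Int) "") := by
  induction l generalizing t with
  | nil => simp
  | cons p l ih =>
    simp only [List.foldl_cons]
    have hmem : (j : Int) ∈ PySem.List.pyRange 0 (binary.length : Int) 1 := by
      rw [PySem.List.mem_pyRange_one]; omega
    obtain ⟨g1, g2⟩ := pvFold_get binary p (PySem.List.pyRange 0 (binary.length : Int) 1)
      (PySem.List.nodup_pyRange_one 0 binary.length)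
      (fun x hx => (PySem.List.mem_pyRange_one.mp hx).1) t j (by omega) (by omega)
    obtain ⟨l1, l2⟩ := pvFold_len binary p (PySem.List.pyRange 0 (binary.length : Int) 1) t
    obtain ⟨ih1, ih2⟩ := ih (pvInner binary binary.length t p)
      (by unfold pvInner; omega) (by unfold pvInner; omega)
    rw [ih1, ih2]
    unfold pvInner
    rw [g1, g2]
    constructor
    · by_cases hc : pvCond binary p j <;> simp [hc, hmem, List.countP_cons] <;> push_cast <;> ring
    · by_cases hc : pvCond binary p j <;>
        simp [hc, hmem, List.filter_cons, pvGetLastD_cons]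

def pvGA (binary : List Int) (accent_binaries : List (String × List Int)) (profile : List (String × Int)) (i : Int) : Int :=
  let prof := PySem.Dict.ofList profile
  let ab := PySem.Dict.ofList accent_binaries
  if PySem.List.pyGetD binary i 0 = 0 then prof.getD "gap" 0
  else
    let active_labels := ((ab.keys.zip ab.values).filter
      (fun p => PySem.List.pyGetD p.2 (PySem.Int.mod i (p.2.length : Int)) 0 != 0)).map (·.1)
    if 2 ≤ active_labels.length then prof.getD "overlap" 0
    else if active_labels.length = 1 then prof.getD (PySem.List.pyGetD active_labels 0 "") 0
    else prof.getD "gap" 0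

def pvGB (binary : List Int) (accent_binaries : List (String × List Int)) (profile : List (String × Int)) (i : Int) : Int :=
  let prof := PySem.Dict.ofList profile
  let tables := (PySem.Dict.ofList accent_binaries).items.foldl (pvInner binary binary.length)
    (List.replicate binary.length (0 : Int), List.replicate binary.length "")
  if PySem.List.pyGetD binary i 0 = 0 then prof.getD "gap" 0
  else if 2 ≤ PySem.List.pyGetD tables.1 i 0 then prof.getD "overlap" 0
  else if PySem.List.pyGetD tables.1 i 0 = 1 then prof.getD (PySem.List.pyGetD tables.2 i "") 0
  else prof.getD "gap" 0

lemma pvFoldMap {α β : Type} (L : List α) (g : List β → α → List β) (f : α → β)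
    (h : ∀ acc x, g acc x = acc ++ [f x]) (init : List β) : L.foldl g init = init ++ L.map f := by
  induction L generalizing init with
  | nil => simp
  | cons a L ih => simp only [List.foldl_cons, List.map_cons, h]; rw [ih]; simp

lemma pvA_eq (binary : List Int) (accent_binaries : List (String × List Int)) (profile : List (String × Int)) :
    accent_velocity binary accent_binaries profile
      = (PySem.List.pyRange 0 (binary.length : Int) 1).map (pvGA binary accent_binaries profile) := by
  simp only [accent_velocity]
  rw [pvFoldMap _ _ (pvGA binary accent_binaries profile)
    (by intro acc x; simp only [pvGA]; split_ifs <;> rfl)]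
  simp

lemma pvB_eq (binary : List Int) (accent_binaries : List (String × List Int)) (profile : List (String × Int)) :
    accent_velocity_alt binary accent_binaries profile
      = (PySem.List.pyRange 0 (binary.length : Int) 1).map (pvGB binary accent_binaries profile) := by
  simp only [accent_velocity_alt]
  rw [pvFoldMap _ _ (pvGB binary accent_binaries profile)
    (by intro acc x; simp only [pvGB]; split_ifs <;> rfl)]
  simp

lemma pvPoint (binary : List Int) (accent_binaries : List (String × List Int)) (profile : List (String × Int))
    (i : Int) (hi : i ∈ PySem.List.pyRange 0 (binary.length : Int) 1) :
    pvGA binary accent_binaries profile i = pvGB binary accent_binaries profile i := by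
  obtain ⟨h0, h1⟩ := PySem.List.mem_pyRange_one.mp hi
  obtain ⟨j, rfl⟩ : ∃ j : Nat, (j : Int) = i := ⟨i.toNat, Int.toNat_of_nonneg h0⟩
  have hjn : j < binary.length := by omega
  simp only [pvGA, pvGB]
  set l := (PySem.Dict.ofList accent_binaries).items with hl
  obtain ⟨o1, o2⟩ := pvOuter_get binary l
    (List.replicate binary.length (0 : Int), List.replicate binary.length "") j hjn
    (by simp) (by simp)
  have hz : PySem.List.pyGetD (List.replicate binary.length (0 : Int)) (j : Int) 0 = 0 := by
    rw [PySem.List.pyGetD_eq_getElem _ _ (by positivity) (by simpa using hjn)]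
    simp
  have hs : PySem.List.pyGetD (List.replicate binary.length "") (j : Int) "" = "" := by
    rw [PySem.List.pyGetD_eq_getElem _ _ (by positivity) (by simpa using hjn)]
    simp
  rw [hz] at o1
  rw [hs] at o2
  by_cases hb : PySem.List.pyGetD binary (j : Int) 0 = 0
  · simp [hb]
  · simp only [hb, if_false, if_neg hb]
    have hzip : (PySem.Dict.ofList accent_binaries).keys.zip (PySem.Dict.ofList accent_binaries).values = l := by
      simp only [PySem.Dict.keys, PySem.Dict.values, hl]
      exact Eq.symm (List.zip_of_prod rfl rfl)
    rw [hzip]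
    have hcond : ∀ p : String × List Int,
        pvCond binary p (j : Int) = (PySem.List.pyGetD p.2 (PySem.Int.mod (j : Int) (p.2.length : Int)) 0 != 0) := by
      intro p
      unfold pvCond
      rw [show (PySem.List.pyGetD binary (j : Int) 0 != 0) = true by simpa using hb]
      simp
    have hfil : l.filter (fun p => pvCond binary p (j : Int))
        = l.filter (fun p => PySem.List.pyGetD p.2 (PySem.Int.mod (j : Int) (p.2.length : Int)) 0 != 0) :=
      List.filter_congr (fun p _ => by rw [hcond])
    have hcnt : (l.countP (fun p => pvCond binary p (j : Int)))
        = ((l.filter (fun p => PySem.List.pyGetD p.2 (PySem.Int.mod (j : Int) (p.2.length : Int)) 0 != 0)).map (·.1)).length := by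
      rw [List.length_map, ← List.countP_eq_length_filter]
      exact List.countP_congr (fun p _ => by rw [hcond])
    rw [o1, o2, hfil, hcnt]
    set act := (l.filter (fun p => PySem.List.pyGetD p.2 (PySem.Int.mod (j : Int) (p.2.length : Int)) 0 != 0)).map (·.1) with hact
    clear_value act
    rcases act with _ | ⟨x, _ | ⟨y, rest⟩⟩
    · norm_num
    · norm_num [PySem.List.pyGetD_zero_cons]
    · have h2 : 2 ≤ (x :: y :: rest).length := by simp
      rw [if_pos h2, if_pos (by push_cast; omega)]

-- ===== VERDICT (by name: the statement is the Claim_ definition above) =====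
theorem accent_velocity_spec : Claim_equal_accent_velocity := by
  intro binary accent_binaries profile _ _
  unfold Spec_accent_velocity
  rw [pvA_eq, pvB_eq]
  exact List.map_congr_left (fun i hi => pvPoint binary accent_binaries profile i hi)
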